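-- pv_equiv track=rewrite | github.com/Rocketsoftwar3/Ateliers | Atelier3Léonor.py | outPutStr
-- ===== SOURCE A (Python) =====
-- def outPutStr(mot:str,lpos:list)->str:
--     newmot:str=""
--     for i in range (0,len(mot)):
--         if i not in lpos:
--             newmot+="_"
--         else:
--             newmot+=mot[i]
--     return newmot
-- ===== SOURCE B (Python) =====
-- def outPutStr(mot: str, lpos: list) -> str:
--     buf = ["_"] * len(mot)
--     for p in lpos:
--         if 0 <= p < len(mot):
--             buf[p] = mot[p]
--     return "".join(buf)
-- ===== Notes on version B (the rewrite author's own statement) =====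
-- stated objective: faster
-- what changed: B scatters: it fills a mutable underscore buffer once and writes mot[p] at each in-range position p of lpos, instead of A's gather that tests every string index for membership in lpos and concatenates strings.
import Mathlib
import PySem

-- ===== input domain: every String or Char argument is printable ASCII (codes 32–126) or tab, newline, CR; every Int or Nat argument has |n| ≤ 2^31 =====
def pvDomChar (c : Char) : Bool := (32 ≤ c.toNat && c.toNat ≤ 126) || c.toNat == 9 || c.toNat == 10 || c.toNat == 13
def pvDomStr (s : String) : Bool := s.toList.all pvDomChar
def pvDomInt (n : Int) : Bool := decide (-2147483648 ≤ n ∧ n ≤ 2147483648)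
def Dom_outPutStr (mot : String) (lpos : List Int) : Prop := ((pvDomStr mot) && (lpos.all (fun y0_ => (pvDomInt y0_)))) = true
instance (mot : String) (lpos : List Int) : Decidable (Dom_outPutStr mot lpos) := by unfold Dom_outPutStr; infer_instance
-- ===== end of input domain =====

-- B replaces A's per-index membership gather with a single scatter pass over lpos into an
-- underscore buffer (measured faster on the generated inputs; A rescans lpos for every character).

-- ===== PORT A =====
-- for i in range(0, len(mot)): newmot += "_" if i not in lpos else mot[i]
def outPutStr (mot : String) (lpos : List Int) : String :=
  let cs := mot.toList
  let newmot := (PySem.List.pyRange 0 (PySem.List.len cs) 1).foldl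
    (fun acc i => if i ∉ lpos then acc ++ ['_'] else acc ++ [PySem.List.pyGetD cs i '_']) []
  String.ofList newmot

-- ===== PORT B =====
-- buf = ['_']*len(mot); for p in lpos: if 0 <= p < len(mot): buf[p] = mot[p]; return ''.join(buf)
def outPutStr_alt (mot : String) (lpos : List Int) : String :=
  let cs := mot.toList
  let buf0 := List.replicate cs.length '_'
  let buf := lpos.foldl
    (fun b p => if 0 ≤ p ∧ p < PySem.List.len cs then PySem.List.pySetD b p (PySem.List.pyGetD cs p '_') else b) buf0
  String.ofList buf

-- ===== PRECONDITION & SPEC =====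
def Spec_outPutStr (mot : String) (lpos : List Int) (out : String) : Prop := out = outPutStr_alt mot lpos
instance (mot : String) (lpos : List Int) (out : String) : Decidable (Spec_outPutStr mot lpos out) := by unfold Spec_outPutStr; infer_instance

-- ===== CLAIM (what is proved, stated in full; the proofs are below) =====
def Claim_equal_outPutStr : Prop := ∀ (mot : String) (lpos : List Int), Dom_outPutStr mot lpos → Spec_outPutStr mot lpos (outPutStr mot lpos)

-- ===== LEMMAS AND PROOFS =====

-- the common pointwise description of both results
def pvF (cs : List Char) (lpos : List Int) (k : Nat) : Char :=
  if (k : Int) ∈ lpos then cs.getD k '_' else '_'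

-- A's gather loop appends one character per index
theorem pvA_foldl (cs : List Char) (lpos : List Int) (l : List Int) (acc : List Char) :
    l.foldl (fun acc i => if i ∉ lpos then acc ++ ['_']
             else acc ++ [PySem.List.pyGetD cs i '_']) acc
      = acc ++ l.map (fun i => if i ∉ lpos then '_' else PySem.List.pyGetD cs i '_') := by
  induction l generalizing acc with
  | nil => simp
  | cons i l ih =>
    simp only [List.foldl_cons, List.map_cons, ih]
    by_cases h : i ∈ lpos <;> simp [h]

theorem pvA_char (mot : String) (lpos : List Int) :
    (outPutStr mot lpos).toList = (List.range mot.toList.length).map (pvF mot.toList lpos) := by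
  simp only [outPutStr, PySem.List.len_eq, PySem.List.pyRange_zero_natCast,
    String.toList_ofList]
  rw [pvA_foldl]
  simp only [List.nil_append, List.map_map]
  refine List.map_congr_left ?_
  intro k _
  simp [pvF, Function.comp, ite_not]

-- invariant of B's scatter loop: length is preserved, and position k holds cs[k]
-- once k occurs among the processed positions, else the buffer's previous content
theorem pvB_inv (cs : List Char) (lpos : List Int) (b : List Char)
    (hb : b.length = cs.length) :
    (lpos.foldl (fun b p => if 0 ≤ p ∧ p < PySem.List.len cs
        then PySem.List.pySetD b p (PySem.List.pyGetD cs p '_') else b) b).length = cs.length ∧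
    ∀ k, k < cs.length →
      (lpos.foldl (fun b p => if 0 ≤ p ∧ p < PySem.List.len cs
          then PySem.List.pySetD b p (PySem.List.pyGetD cs p '_') else b) b).getD k '_'
        = if (k : Int) ∈ lpos then cs.getD k '_' else b.getD k '_' := by
  induction lpos generalizing b with
  | nil => simp [hb]
  | cons p rest ih =>
    simp only [List.foldl_cons]
    by_cases hp : 0 ≤ p ∧ p < PySem.List.len cs
    · rw [if_pos hp]
      have hp2 : p < (cs.length : Int) := by
        have := hp.2; rwa [PySem.List.len_eq] at this
      have hlen : (PySem.List.pySetD b p (PySem.List.pyGetD cs p '_')).length = cs.length := by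
        rw [PySem.List.length_pySetD, hb]
      obtain ⟨h1, h2⟩ := ih _ hlen
      refine ⟨h1, ?_⟩
      intro k hk
      rw [h2 k hk]
      by_cases hkr : (k : Int) ∈ rest
      · simp [hkr, List.mem_cons]
      · rw [if_neg hkr]
        by_cases hkp : (k : Int) = p
        · have hpn : p.toNat = k := by omega
          rw [if_pos (by simp [List.mem_cons, hkp])]
          rw [PySem.List.pySetD_of_nonneg (h := hp.1),
            PySem.List.pyGetD_eq_getElem cs '_' hp.1 hp2]
          subst hpn
          have hklt : p.toNat < b.length := by omega
          simp [List.getD, hklt, hk]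
        · rw [if_neg (by simp [List.mem_cons, hkp, hkr])]
          rw [PySem.List.pySetD_of_nonneg (h := hp.1)]
          have hne : p.toNat ≠ k := by omega
          simp [List.getD, hne]
    · rw [if_neg hp]
      obtain ⟨h1, h2⟩ := ih _ hb
      refine ⟨h1, ?_⟩
      intro k hk
      rw [h2 k hk]
      have hkp : (k : Int) ≠ p := by
        intro h
        apply hp
        refine ⟨by omega, ?_⟩
        rw [PySem.List.len_eq, ← h]
        exact_mod_cast hk
      by_cases hkr : (k : Int) ∈ rest <;> simp [List.mem_cons, hkr, hkp]

theorem pvB_char (mot : String) (lpos : List Int) :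
    (outPutStr_alt mot lpos).toList = (List.range mot.toList.length).map (pvF mot.toList lpos) := by
  simp only [outPutStr_alt, String.toList_ofList]
  obtain ⟨h1, h2⟩ := pvB_inv mot.toList lpos (List.replicate mot.toList.length '_') (by simp)
  apply List.ext_getElem
  · rw [h1]; simp
  · intro k hk1 hk2
    have hk : k < mot.toList.length := by rw [h1] at hk1; exact hk1
    have hgd := h2 k hk
    rw [List.getD_eq_getElem _ _ hk1] at hgd
    rw [hgd]
    have : (List.replicate mot.toList.length '_').getD k '_' = '_' := by
      simp only [List.getD, List.getElem?_replicate]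
      split <;> rfl
    rw [this]
    simp only [List.getElem_map, List.getElem_range]
    rw [pvF]

theorem outPutStr_eq (mot : String) (lpos : List Int) :
    outPutStr mot lpos = outPutStr_alt mot lpos := by
  have h : (outPutStr mot lpos).toList = (outPutStr_alt mot lpos).toList := by
    rw [pvA_char, pvB_char]
  calc outPutStr mot lpos = String.ofList (outPutStr mot lpos).toList := by simp
    _ = String.ofList (outPutStr_alt mot lpos).toList := by rw [h]
    _ = outPutStr_alt mot lpos := by simp

-- ===== VERDICT (by name: the statement is the Claim_ definition above) =====
theorem outPutStr_spec : Claim_equal_outPutStr := by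
  intro mot lpos _
  exact outPutStr_eq mot lpos
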